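-- pv_equiv track=rewrite | github.com/CheerfulUser/K2BS-Webpage | k2bs_webpage.py | Reduce_string
-- ===== SOURCE A (Python) =====
-- def Reduce_string(string):
-- 	"""
-- 	Reduces the size of a html event string by one component.
-- 	"""
-- 	temp = string.split('_')
-- 	temp2=''
-- 	for i in range(len(temp)-1):
-- 		if i != (len(temp)-2):
-- 			temp2 += temp[i] + '_'
-- 		else:
-- 			temp2 += temp[i] + '.html'
-- 	return temp2
-- ===== SOURCE B (Python) =====
-- def Reduce_string(string):
--     """Drop the last underscore-separated component and append the html suffix."""
--     pos = string.rfind('_')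
--     if pos == -1:
--         return ''
--     return string[:pos] + '.html'
-- ===== Notes on version B (the rewrite author's own statement) =====
-- stated objective: simpler
-- what changed: Replaces split-into-list plus index-loop rebuild with a single rfind of the last underscore and one slice (empty string when no underscore is present, matching A).
import Mathlib
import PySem

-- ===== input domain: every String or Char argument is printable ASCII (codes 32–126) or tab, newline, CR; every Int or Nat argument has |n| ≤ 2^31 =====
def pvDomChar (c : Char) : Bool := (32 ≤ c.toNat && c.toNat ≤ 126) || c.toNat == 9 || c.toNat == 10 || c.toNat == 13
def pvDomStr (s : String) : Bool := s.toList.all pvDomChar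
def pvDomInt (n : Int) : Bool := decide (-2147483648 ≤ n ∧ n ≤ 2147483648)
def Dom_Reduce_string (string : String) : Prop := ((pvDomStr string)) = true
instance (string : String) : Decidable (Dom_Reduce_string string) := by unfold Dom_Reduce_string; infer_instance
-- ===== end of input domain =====

-- B replaces A's split-into-list-and-rebuild loop by one rfind of the last underscore and a single slice (simpler; same behaviour, including the empty string when no underscore occurs).


-- ===== PORT A =====
def Reduce_string (string : String) : String :=
  let temp := PySem.Chars.splitOn string.toList ['_']
  let temp2 := (PySem.List.pyRange 0 ((temp.length : Int) - 1)).foldl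
    (fun temp2 i =>
      if i ≠ (temp.length : Int) - 2 then
        temp2 ++ PySem.List.pyGetD temp i [] ++ ['_']
      else
        temp2 ++ PySem.List.pyGetD temp i [] ++ ['.', 'h', 't', 'm', 'l'])
    []
  String.ofList temp2

-- ===== PORT B =====
def Reduce_string_alt (string : String) : String :=
  let pos := PySem.Str.rfind string "_"
  if pos = -1 then ""
  else String.ofList (PySem.Chars.slice string.toList none (some pos) ++ ['.', 'h', 't', 'm', 'l'])

-- ===== PRECONDITION & SPEC =====
def Spec_Reduce_string (string : String) (out : String) : Prop := out = Reduce_string_alt string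
instance (string : String) (out : String) : Decidable (Spec_Reduce_string string out) := by unfold Spec_Reduce_string; infer_instance

-- ===== CLAIM (what is proved, stated in full; the proofs are below) =====
def Claim_equal_Reduce_string : Prop := ∀ (string : String), Dom_Reduce_string string → Spec_Reduce_string string (Reduce_string string)

-- ===== LEMMAS AND PROOFS =====

-- Structural single-char split on '_' (fuel-free model of PySem.Chars.splitOn.go).
def pvF : List Char → List Char → List (List Char)
  | [], cur => [cur.reverse]
  | c :: rest, cur => if c = '_' then cur.reverse :: pvF rest [] else pvF rest (c :: cur)

lemma pvF_ne_nil (l cur : List Char) : pvF l cur ≠ [] := by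
  induction l generalizing cur with
  | nil => simp [pvF]
  | cons c rest ih => by_cases h : c = '_' <;> simp [pvF, h, ih]

lemma go_eq_pvF : ∀ (fuel : Nat) (l cur : List Char) (acc : List (List Char)),
    l.length < fuel →
    PySem.Chars.splitOn.go ['_'] fuel l cur acc = acc.reverse ++ pvF l cur := by
  intro fuel
  induction fuel with
  | zero => intro l cur acc h; omega
  | succ fuel ih =>
    intro l cur acc h
    cases l with
    | nil => rw [PySem.Chars.splitOn.go] <;> simp [pvF]
    | cons c rest =>
      rw [PySem.Chars.splitOn.go]
      by_cases hc : c = '_'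
      · subst hc
        simp only [List.isPrefixOf, BEq.rfl, Bool.true_and, if_true]
        rw [ih _ _ _ (by simpa using Nat.lt_of_succ_lt_succ h)]
        simp [pvF]
      · have : (['_'].isPrefixOf (c :: rest)) = false := by
          simp [List.isPrefixOf]; exact fun he => hc he.symm
        rw [this]
        simp only [Bool.false_eq_true, if_false]
        rw [ih _ _ _ (by simpa using Nat.lt_of_succ_lt_succ h)]
        simp [pvF, hc]

lemma splitOn_eq_pvF (cs : List Char) : PySem.Chars.splitOn cs ['_'] = pvF cs [] := by
  have := go_eq_pvF (cs.length + 1) cs [] [] (by omega)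
  simpa [PySem.Chars.splitOn] using this

lemma pvF_no_us (l cur : List Char) (h : '_' ∉ l) : pvF l cur = [cur.reverse ++ l] := by
  induction l generalizing cur with
  | nil => simp [pvF]
  | cons c rest ih =>
    have hc : c ≠ '_' := by intro hc; exact h (by simp [hc])
    simp [pvF, hc, ih _ (by intro hm; exact h (by simp [hm]))]

lemma pvF_append (u v cur : List Char) :
    pvF (u ++ '_' :: v) cur = pvF u cur ++ pvF v [] := by
  induction u generalizing cur with
  | nil => simp [pvF]
  | cons c rest ih => by_cases h : c = '_' <;> simp [pvF, h, ih]

-- join with '_' (models A's loop output shape)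
def pvJoin : List (List Char) → List Char
  | [] => []
  | [p] => p
  | p :: q :: rest => p ++ '_' :: pvJoin (q :: rest)

lemma pvJoin_eq (Q : List (List Char)) (hQ : Q ≠ []) :
    (Q.dropLast.flatMap (fun p => p ++ ['_'])) ++ (Q.getLast?.getD []) = pvJoin Q := by
  induction Q with
  | nil => simp at hQ
  | cons p rest ih =>
    cases rest with
    | nil => simp [pvJoin]
    | cons q rest' =>
      have := ih (by simp)
      simp only [pvJoin, List.dropLast_cons₂, List.flatMap_cons, List.getLast?_cons_cons] at *
      rw [List.append_assoc, this]; simp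

lemma pvJoin_pvF (u cur : List Char) : pvJoin (pvF u cur) = cur.reverse ++ u := by
  induction u generalizing cur with
  | nil => simp [pvF, pvJoin]
  | cons c rest ih =>
    by_cases h : c = '_'
    · have hne := pvF_ne_nil rest ([] : List Char)
      cases hF : pvF rest [] with
      | nil => exact absurd hF hne
      | cons p ps =>
        subst h
        simp only [pvF, hF]
        show cur.reverse ++ '_' :: pvJoin (p :: ps) = cur.reverse ++ '_' :: rest
        rw [← hF, ih]; simp
    · simp [pvF, h, ih]

-- rfind characterisation
lemma prefix_us (l : List Char) : ['_'].isPrefixOf l = true ↔ ∃ t, l = '_' :: t := by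
  cases l with
  | nil => simp [List.isPrefixOf]
  | cons c t =>
    constructor
    · intro h
      have hc : c = '_' := by
        by_contra hc
        simp [List.isPrefixOf] at h
        exact hc h.symm
      exact ⟨t, by simp [hc]⟩
    · rintro ⟨t', ht⟩; cases ht; simp [List.isPrefixOf]

lemma rfind_go_no_us (cs : List Char) (h : '_' ∉ cs) :
    ∀ j, PySem.Chars.rfind.go cs ['_'] j = -1 := by
  intro j
  induction j with
  | zero =>
    rw [PySem.Chars.rfind.go]
    have : (['_'].isPrefixOf cs) = false := by
      by_contra hb
      rcases (prefix_us cs).1 (by simpa using hb) with ⟨t, ht⟩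
      exact h (ht ▸ by simp)
    simp [this]
  | succ j ih =>
    rw [PySem.Chars.rfind.go]
    have : (['_'].isPrefixOf (List.drop (j+1) cs)) = false := by
      by_contra hb
      rcases (prefix_us _).1 (by simpa using hb) with ⟨t, ht⟩
      have : '_' ∈ List.drop (j+1) cs := ht ▸ by simp
      exact h (List.mem_of_mem_drop this)
    simp [this, ih]

lemma rfind_go_last (u v : List Char) (hv : '_' ∉ v) :
    ∀ j, u.length ≤ j → j ≤ u.length + 1 + v.length →
    PySem.Chars.rfind.go (u ++ '_' :: v) ['_'] j = (u.length : Int) := by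
  intro j
  induction j with
  | zero =>
    intro h1 h2
    have hu : u = [] := List.eq_nil_of_length_eq_zero (Nat.le_zero.1 h1)
    subst hu
    rw [PySem.Chars.rfind.go]
    have : (['_'].isPrefixOf ('_' :: v)) = true := (prefix_us _).2 ⟨v, rfl⟩
    simp [this]
  | succ j ih =>
    intro h1 h2
    rw [PySem.Chars.rfind.go]
    by_cases he : u.length = j + 1
    · have hd : List.drop (j+1) (u ++ '_' :: v) = '_' :: v := by
        rw [← he, List.drop_append_of_le_length (le_refl _)]
        simp
      rw [hd]
      have : (['_'].isPrefixOf ('_' :: v)) = true := (prefix_us _).2 ⟨v, rfl⟩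
      simp [this, he]
    · have hlt : u.length ≤ j := by omega
      have hd : List.drop (j+1) (u ++ '_' :: v) = List.drop (j - u.length) v := by
        have hn : j + 1 = u.length + ((j - u.length) + 1) := by omega
        rw [hn, List.drop_append]
        simp
      have hp : (['_'].isPrefixOf (List.drop (j+1) (u ++ '_' :: v))) = false := by
        by_contra hb
        rcases (prefix_us _).1 (by simpa using hb) with ⟨t, ht⟩
        rw [hd] at ht
        have : '_' ∈ List.drop (j - u.length) v := ht ▸ by simp
        exact hv (List.mem_of_mem_drop this)
      rw [hp]
      simp only [Bool.false_eq_true, if_false]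
      exact ih hlt (by omega)

lemma rfind_no_us (cs : List Char) (h : '_' ∉ cs) : PySem.Chars.rfind cs ['_'] = -1 :=
  rfind_go_no_us cs h _

lemma rfind_last (u v : List Char) (hv : '_' ∉ v) :
    PySem.Chars.rfind (u ++ '_' :: v) ['_'] = (u.length : Int) := by
  have := rfind_go_last u v hv (u ++ '_' :: v).length (by simp) (by simp; omega)
  simpa [PySem.Chars.rfind] using this

-- last-occurrence decomposition
lemma last_us_decomp (cs : List Char) :
    '_' ∉ cs ∨ ∃ u v, cs = u ++ '_' :: v ∧ '_' ∉ v := by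
  induction cs with
  | nil => left; simp
  | cons c rest ih =>
    rcases ih with h | ⟨u, v, rfl, hv⟩
    · by_cases hc : c = '_'
      · right; exact ⟨[], rest, by simp [hc], h⟩
      · left; simp [h]; exact fun he => hc he.symm
    · right; exact ⟨c :: u, v, rfl, hv⟩

-- pyGetD on appends
lemma pyGetD_append_left {α : Type} (xs ys : List α) (i : Int) (d : α)
    (h0 : 0 ≤ i) (h1 : i < xs.length) :
    PySem.List.pyGetD (xs ++ ys) i d = PySem.List.pyGetD xs i d := by
  obtain ⟨n, rfl⟩ : ∃ n : Nat, i = (n : Int) := ⟨i.toNat, (Int.toNat_of_nonneg h0).symm⟩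
  rw [PySem.List.pyGetD_natCast, PySem.List.pyGetD_natCast]
  have hn : n < xs.length := by exact_mod_cast h1
  simp [List.getD_eq_getElem?_getD, List.getElem?_append_left hn]

lemma pyGetD_at {α : Type} (xs : List α) (w : α) (ys : List α) (d : α) :
    PySem.List.pyGetD (xs ++ w :: ys) (xs.length : Int) d = w := by
  rw [PySem.List.pyGetD_natCast]
  simp [List.getD_eq_getElem?_getD]

-- A's loop, evaluated on a split list of shape Q ++ [w, v]
lemma loop_spec (Q : List (List Char)) (w v : List Char) :
    (PySem.List.pyRange 0 (((Q ++ [w, v]).length : Int) - 1)).foldl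
      (fun t2 i =>
        if i ≠ ((Q ++ [w, v]).length : Int) - 2 then
          t2 ++ PySem.List.pyGetD (Q ++ [w, v]) i [] ++ ['_']
        else
          t2 ++ PySem.List.pyGetD (Q ++ [w, v]) i [] ++ ['.', 'h', 't', 'm', 'l'])
      []
    = Q.flatMap (fun p => p ++ ['_']) ++ w ++ ['.', 'h', 't', 'm', 'l'] := by
  have hlen : ((Q ++ [w, v]).length : Int) = (Q.length : Int) + 2 := by simp
  rw [hlen]
  have h1 : (Q.length : Int) + 2 - 1 = (Q.length : Int) + 1 := by omega
  rw [h1]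
  rw [PySem.List.pyRange_one_succ_right (by omega)]
  rw [List.foldl_append]
  have step1 :
      (PySem.List.pyRange 0 (Q.length : Int)).foldl
        (fun t2 i =>
          if i ≠ (Q.length : Int) + 2 - 2 then
            t2 ++ PySem.List.pyGetD (Q ++ [w, v]) i [] ++ ['_']
          else
            t2 ++ PySem.List.pyGetD (Q ++ [w, v]) i [] ++ ['.', 'h', 't', 'm', 'l'])
        []
      = Q.flatMap (fun p => p ++ ['_']) := by
    rw [PySem.List.foldl_congr_mem _ _
      (fun t2 i => t2 ++ (PySem.List.pyGetD Q i [] ++ ['_'])) _ ?_]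
    · rw [PySem.List.foldl_pyRange_pyGetD' Q [] (fun acc p => acc ++ (p ++ ['_'])) [] (le_refl 0)]
      norm_num
      simp [List.flatMap_def]
    · intro acc x hx
      rw [PySem.List.mem_pyRange_one] at hx
      have hne : x ≠ (Q.length : Int) + 2 - 2 := by omega
      rw [if_pos hne, pyGetD_append_left Q [w, v] x [] hx.1 (by exact_mod_cast hx.2)]
      simp
  rw [step1]
  simp only [List.foldl_cons, List.foldl_nil]
  rw [if_neg (by omega)]
  rw [pyGetD_at Q w [v] []]

-- ===== VERDICT (by name: the statement is the Claim_ definition above) =====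
theorem Reduce_string_spec : Claim_equal_Reduce_string := by
  intro s _
  unfold Spec_Reduce_string Reduce_string Reduce_string_alt
  simp only [PySem.Str.rfind_eq, show ("_" : String).toList = ['_'] from rfl]
  rcases last_us_decomp s.toList with h | ⟨u, v, hcs, hv⟩
  · rw [rfind_no_us _ h, if_pos rfl]
    rw [splitOn_eq_pvF, pvF_no_us _ _ h]
    simp [PySem.List.pyRange_one_eq_nil]
  · rw [hcs, rfind_last u v hv, if_neg (by omega)]
    rw [splitOn_eq_pvF, pvF_append, pvF_no_us v [] hv]
    simp only [List.reverse_nil, List.nil_append]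
    -- split P := pvF u [] as Q ++ [wlast]
    obtain ⟨Q, wlast, hP⟩ : ∃ Q wl, pvF u [] = Q ++ [wl] := by
      rcases List.eq_nil_or_concat (pvF u []) with hnil | h'
      · exact absurd hnil (pvF_ne_nil u [])
      · obtain ⟨Q, wl, h'⟩ := h'
        exact ⟨Q, wl, by simpa [List.concat_eq_append] using h'⟩
    have hu : Q.flatMap (fun p => p ++ ['_']) ++ wlast = u := by
      have h1 := pvJoin_pvF u []
      rw [hP] at h1
      have h2 := pvJoin_eq (Q ++ [wlast]) (by simp)
      simp only [List.dropLast_concat, List.getLast?_concat, Option.getD_some] at h2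
      rw [h2, h1]
      simp
    rw [hP, List.append_assoc]
    have : ([wlast] ++ [v] : List (List Char)) = [wlast, v] := rfl
    rw [this, loop_spec Q wlast v]
    have hslice : PySem.Chars.slice (u ++ '_' :: v) none (some (u.length : Int))
        = u := by
      simp only [PySem.Chars.slice_eq_listSlice]
      rw [PySem.List.slice_to_natCast]
      simp
    rw [hslice, ← hu]
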